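-- pv_equiv track=rewrite | github.com/ahmadtantawy-minio/DemoForge | backend/app/engine/minio_ec_parity_normalize.py | cluster_ec_status_from_online_matrix
-- ===== SOURCE A (Python) =====
-- def compute_erasure_set_size(total_drives: int) -> int:
--     """Largest d in 16..2 dividing total_drives; else total_drives (matches frontend)."""
--     for d in range(16, 1, -1):
--         if total_drives % d == 0:
--             return d
--     return total_drives
--
-- def effective_stripe_drives(total_drives: int, preferred: int | None) -> int:
--     """Stripe drive count for EC rules: ``preferred`` when valid, else ``compute_erasure_set_size``."""
--     if preferred is not None and preferred > 0 and total_drives % preferred == 0: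
--         if valid_minio_standard_parities(preferred):
--             return preferred
--     return compute_erasure_set_size(total_drives)
--
-- def valid_minio_standard_parities(stripe_size: int) -> list[int]:
--     max_parity = stripe_size // 2
--     return list(range(2, max_parity + 1))
--
-- def compute_write_quorum(stripe_size: int, ec_parity: int) -> int:
--     """MinIO write quorum for one erasure set (matches frontend ``computePoolErasureStats``)."""
--     data_shards = max(0, stripe_size - ec_parity)
--     if data_shards == ec_parity:
--         return data_shards + 1
--     return max(1, data_shards)
--
-- def compute_pool_erasure_stats(
--     node_count: int,
--     drives_per_node: int,
--     ec_parity: int,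
--     erasure_stripe_drives: int | None = None,
-- ) -> dict[str, int]:
--     """Stripe geometry for one server pool (mirrors frontend ``computePoolErasureStats``)."""
--     total_drives = node_count * drives_per_node
--     set_size = effective_stripe_drives(total_drives, erasure_stripe_drives)
--     num_sets = total_drives // set_size if set_size else 0
--     data_shards = max(0, set_size - ec_parity)
--     return {
--         "set_size": set_size,
--         "num_sets": num_sets,
--         "data_shards": data_shards,
--         "parity_shards": ec_parity,
--         "write_quorum": compute_write_quorum(set_size, ec_parity),
--         "total_drives": total_drives,
--     }
--
-- def _cluster_ec_status_clusterwide(drives_online: int, drives_total: int, ec_parity: int) -> str: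
--     """Fallback when stripe layout cannot be inferred from the drive matrix."""
--     if drives_total == 0:
--         return "unknown"
--     if drives_online >= drives_total:
--         return "healthy"
--     write_quorum = max(1, drives_total - ec_parity)
--     if drives_online >= write_quorum:
--         return "degraded"
--     return "quorum_lost"
--
-- def cluster_ec_status_from_online_matrix(
--     online: list[list[bool]],
--     ec_parity: int,
--     erasure_stripe_drives: int | None = None,
-- ) -> str:
--     """Per-stripe quorum using MinIO-style round-robin placement across nodes."""
--     if not online:
--         return "unknown"
--     drives_per_node = len(online[0])
--     if drives_per_node == 0 or any(len(row) != drives_per_node for row in online):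
--         flat = [d for row in online for d in row]
--         return _cluster_ec_status_clusterwide(sum(flat), len(flat), ec_parity)
--
--     num_nodes = len(online)
--     total_drives = num_nodes * drives_per_node
--     stats = compute_pool_erasure_stats(num_nodes, drives_per_node, ec_parity, erasure_stripe_drives)
--     set_size = stats["set_size"]
--     num_sets = stats["num_sets"]
--     write_quorum = stats["write_quorum"]
--
--     if num_sets < 1 or set_size * num_sets != total_drives:
--         return _cluster_ec_status_clusterwide(sum(cell for row in online for cell in row), total_drives, ec_parity)
--
--     if set_size % num_nodes != 0:
--         return _cluster_ec_status_clusterwide(sum(cell for row in online for cell in row), total_drives, ec_parity)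
--
--     drives_per_node_per_set = set_size // num_nodes
--     overall = "healthy"
--     for set_idx in range(num_sets):
--         online_in_set = 0
--         for slot in range(set_size):
--             node_idx = slot % num_nodes
--             drive_slot = (slot // num_nodes) + drives_per_node_per_set * set_idx
--             if online[node_idx][drive_slot]:
--                 online_in_set += 1
--         if online_in_set < write_quorum:
--             return "quorum_lost"
--         if online_in_set < set_size:
--             overall = "degraded"
--     return overall
-- ===== SOURCE B (Python) =====
-- def compute_erasure_set_size(total_drives):
--     for d in range(16, 1, -1):
--         if total_drives % d == 0:
--             return d
--     return total_drives
--
-- def valid_minio_standard_parities(stripe_size):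
--     max_parity = stripe_size // 2
--     return list(range(2, max_parity + 1))
--
-- def effective_stripe_drives(total_drives, preferred):
--     if preferred is not None and preferred > 0 and total_drives % preferred == 0:
--         if valid_minio_standard_parities(preferred):
--             return preferred
--     return compute_erasure_set_size(total_drives)
--
-- def compute_write_quorum(stripe_size, ec_parity):
--     data_shards = max(0, stripe_size - ec_parity)
--     if data_shards == ec_parity:
--         return data_shards + 1
--     return max(1, data_shards)
--
-- def _cluster_ec_status_clusterwide(drives_online, drives_total, ec_parity):
--     if drives_total == 0:
--         return "unknown"
--     if drives_online >= drives_total: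
--         return "healthy"
--     write_quorum = max(1, drives_total - ec_parity)
--     if drives_online >= write_quorum:
--         return "degraded"
--     return "quorum_lost"
--
-- def cluster_ec_status_from_online_matrix(online, ec_parity, erasure_stripe_drives=None):
--     if not online:
--         return "unknown"
--     drives_per_node = len(online[0])
--     if drives_per_node == 0 or any(len(row) != drives_per_node for row in online):
--         flat = [d for row in online for d in row]
--         return _cluster_ec_status_clusterwide(sum(flat), len(flat), ec_parity)
--
--     num_nodes = len(online)
--     total_drives = num_nodes * drives_per_node
--     set_size = effective_stripe_drives(total_drives, erasure_stripe_drives)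
--     num_sets = total_drives // set_size if set_size else 0
--     write_quorum = compute_write_quorum(set_size, ec_parity)
--
--     if num_sets < 1 or set_size * num_sets != total_drives or set_size % num_nodes != 0:
--         return _cluster_ec_status_clusterwide(
--             sum(cell for row in online for cell in row), total_drives, ec_parity)
--
--     # Each erasure set is the contiguous column block [dpps*s, dpps*(s+1)) on every
--     # node: bucket every online drive by its column block in one flat pass.
--     dpps = set_size // num_nodes
--     counts = [0] * num_sets
--     for row in online:
--         for col, cell in enumerate(row):
--             if cell:
--                 counts[col // dpps] += 1
--     if any(c < write_quorum for c in counts):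
--         return "quorum_lost"
--     if any(c < set_size for c in counts):
--         return "degraded"
--     return "healthy"
-- ===== Notes on version B (the rewrite author's own statement) =====
-- stated objective: simpler
-- what changed: The per-set round-robin slot loop (modular node/drive indexing per set, early return with an 'overall' flag) is replaced by one flat pass over the matrix that buckets each online drive by its contiguous column block (counts[col // dpps] += 1), followed by two scans of the per-set counts; helpers and all fallback guards are unchanged.
import Mathlib
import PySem

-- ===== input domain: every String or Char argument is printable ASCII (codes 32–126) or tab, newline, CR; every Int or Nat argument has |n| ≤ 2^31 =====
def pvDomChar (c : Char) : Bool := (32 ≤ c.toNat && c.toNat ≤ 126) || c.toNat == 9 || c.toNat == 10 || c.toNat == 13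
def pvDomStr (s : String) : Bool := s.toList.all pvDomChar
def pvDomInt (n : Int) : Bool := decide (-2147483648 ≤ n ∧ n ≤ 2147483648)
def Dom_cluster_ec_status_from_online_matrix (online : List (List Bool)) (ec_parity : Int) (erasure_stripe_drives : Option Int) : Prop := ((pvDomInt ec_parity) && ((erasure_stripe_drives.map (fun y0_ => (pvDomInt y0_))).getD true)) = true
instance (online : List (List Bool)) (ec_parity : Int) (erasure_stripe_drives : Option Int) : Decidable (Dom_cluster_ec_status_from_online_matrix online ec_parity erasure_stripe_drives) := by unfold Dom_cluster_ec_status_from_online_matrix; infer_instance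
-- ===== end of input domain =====

-- B replaces A's per-set round-robin slot loop with one flat bucket-counting pass over the
-- matrix (each erasure set is a contiguous column block) followed by two scans of the counts;
-- all helpers and fallback guards are kept identical.  Objective: simpler.

-- ===== PORT A =====
-- shared module helpers (used verbatim by both Pythons)

-- 'for d in range(16, 1, -1): if total_drives % d == 0: return d' with early return
def cessLoop (total_drives : Int) : List Int → Int
  | [] => total_drives
  | d :: ds => if PySem.Int.mod total_drives d == 0 then d else cessLoop total_drives ds

def compute_erasure_set_size (total_drives : Int) : Int :=
  cessLoop total_drives (PySem.List.pyRange 16 1 (-1))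

def valid_minio_standard_parities (stripe_size : Int) : List Int :=
  let max_parity := PySem.Int.floordiv stripe_size 2
  PySem.List.pyRange 2 (max_parity + 1) 1

def effective_stripe_drives (total_drives : Int) (preferred : Option Int) : Int :=
  match preferred with
  | none => compute_erasure_set_size total_drives
  | some p =>
    -- 'preferred > 0' short-circuits before 'total % preferred', so mod is only taken with p > 0
    if p > 0 && (PySem.Int.mod total_drives p == 0) then
      -- Python truthiness of the list returned by valid_minio_standard_parities
      if (valid_minio_standard_parities p).isEmpty then compute_erasure_set_size total_drives else p
    else compute_erasure_set_size total_drives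

def compute_write_quorum (stripe_size ec_parity : Int) : Int :=
  let data_shards := max 0 (stripe_size - ec_parity)
  if data_shards == ec_parity then data_shards + 1 else max 1 data_shards

def compute_pool_erasure_stats (node_count drives_per_node ec_parity : Int) (erasure_stripe_drives : Option Int) : PySem.Dict String Int :=
  let total_drives := node_count * drives_per_node
  let set_size := effective_stripe_drives total_drives erasure_stripe_drives
  let num_sets := if set_size != 0 then PySem.Int.floordiv total_drives set_size else 0
  let data_shards := max 0 (set_size - ec_parity)
  PySem.Dict.ofList
    [("set_size", set_size), ("num_sets", num_sets), ("data_shards", data_shards),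
     ("parity_shards", ec_parity), ("write_quorum", compute_write_quorum set_size ec_parity),
     ("total_drives", total_drives)]

def _cluster_ec_status_clusterwide (drives_online drives_total ec_parity : Int) : String :=
  if drives_total == 0 then "unknown"
  else if drives_online ≥ drives_total then "healthy"
  else
    let write_quorum := max 1 (drives_total - ec_parity)
    if drives_online ≥ write_quorum then "degraded" else "quorum_lost"

-- sum() over Python bools counts the Trues
def pySumBools (xs : List Bool) : Int := (xs.map (fun d => if d then (1 : Int) else 0)).sum

-- A's 'for set_idx in range(num_sets)' loop with its early 'return "quorum_lost"' and the
-- 'overall' accumulator; the matrix indices are always in range when this is reached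
-- (guards above), so pyGetD's defaults are never consulted and the port is exact.
-- A's inner 'for slot in range(set_size)' counting loop for one erasure set
def setCnt (online : List (List Bool)) (num_nodes dpps set_size set_idx : Int) : Int :=
  (PySem.List.pyRange 0 set_size 1).foldl (fun acc slot =>
    let node_idx := PySem.Int.mod slot num_nodes
    let drive_slot := PySem.Int.floordiv slot num_nodes + dpps * set_idx
    if PySem.List.pyGetD (PySem.List.pyGetD online node_idx []) drive_slot false then acc + 1 else acc) 0

def aSetLoop (online : List (List Bool)) (num_nodes dpps set_size write_quorum : Int) : List Int → String → String
  | [], overall => overall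
  | set_idx :: rest, overall =>
    let online_in_set := setCnt online num_nodes dpps set_size set_idx
    if online_in_set < write_quorum then "quorum_lost"
    else aSetLoop online num_nodes dpps set_size write_quorum rest
          (if online_in_set < set_size then "degraded" else overall)

def cluster_ec_status_from_online_matrix (online : List (List Bool)) (ec_parity : Int) (erasure_stripe_drives : Option Int) : String :=
  match online with
  | [] => "unknown"
  | row0 :: _ =>
    let drives_per_node : Int := row0.length
    if drives_per_node == 0 || online.any (fun row => (row.length : Int) != drives_per_node) then
      let flat := online.flatMap (fun row => row)
      _cluster_ec_status_clusterwide (pySumBools flat) flat.length ec_parity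
    else
      let num_nodes : Int := online.length
      let total_drives := num_nodes * drives_per_node
      let stats := compute_pool_erasure_stats num_nodes drives_per_node ec_parity erasure_stripe_drives
      -- stats["…"]: the keys are always present, so getD's default is never consulted
      let set_size := (stats.get? "set_size").getD 0
      let num_sets := (stats.get? "num_sets").getD 0
      let write_quorum := (stats.get? "write_quorum").getD 0
      if num_sets < 1 || set_size * num_sets != total_drives then
        _cluster_ec_status_clusterwide (pySumBools (online.flatMap (fun row => row))) total_drives ec_parity
      else if PySem.Int.mod set_size num_nodes != 0 then
        _cluster_ec_status_clusterwide (pySumBools (online.flatMap (fun row => row))) total_drives ec_parity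
      else
        let dpps := PySem.Int.floordiv set_size num_nodes
        aSetLoop online num_nodes dpps set_size write_quorum (PySem.List.pyRange 0 num_sets 1) "healthy"

-- ===== PORT B =====
-- B's one flat counting pass: 'counts[col // dpps] += 1'; the bucket index is always in
-- range when this is reached (col < w = dpps*num_sets), so List.modify is exact here.
def bCountPass (online : List (List Bool)) (dpps : Int) (counts0 : List Int) : List Int :=
  online.foldl (fun cs row =>
    (PySem.List.enumerate row 0).foldl (fun cs2 p =>
      if p.2 then cs2.modify (PySem.Int.floordiv p.1 dpps).toNat (· + 1) else cs2) cs) counts0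

def cluster_ec_status_from_online_matrix_alt (online : List (List Bool)) (ec_parity : Int) (erasure_stripe_drives : Option Int) : String :=
  match online with
  | [] => "unknown"
  | row0 :: _ =>
    let drives_per_node : Int := row0.length
    if drives_per_node == 0 || online.any (fun row => (row.length : Int) != drives_per_node) then
      let flat := online.flatMap (fun row => row)
      _cluster_ec_status_clusterwide (pySumBools flat) flat.length ec_parity
    else
      let num_nodes : Int := online.length
      let total_drives := num_nodes * drives_per_node
      let set_size := effective_stripe_drives total_drives erasure_stripe_drives
      let num_sets := if set_size != 0 then PySem.Int.floordiv total_drives set_size else 0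
      let write_quorum := compute_write_quorum set_size ec_parity
      if num_sets < 1 || set_size * num_sets != total_drives || PySem.Int.mod set_size num_nodes != 0 then
        _cluster_ec_status_clusterwide (pySumBools (online.flatMap (fun row => row))) total_drives ec_parity
      else
        let dpps := PySem.Int.floordiv set_size num_nodes
        let counts := bCountPass online dpps (List.replicate num_sets.toNat 0)
        if counts.any (fun c => c < write_quorum) then "quorum_lost"
        else if counts.any (fun c => c < set_size) then "degraded"
        else "healthy"

-- ===== PRECONDITION & SPEC =====
def Spec_cluster_ec_status_from_online_matrix (online : List (List Bool)) (ec_parity : Int) (erasure_stripe_drives : Option Int) (out : String) : Prop := out = cluster_ec_status_from_online_matrix_alt online ec_parity erasure_stripe_drives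
instance (online : List (List Bool)) (ec_parity : Int) (erasure_stripe_drives : Option Int) (out : String) : Decidable (Spec_cluster_ec_status_from_online_matrix online ec_parity erasure_stripe_drives out) := by unfold Spec_cluster_ec_status_from_online_matrix; infer_instance

-- ===== CLAIM (what is proved, stated in full; the proofs are below) =====
def Claim_equal_cluster_ec_status_from_online_matrix : Prop := ∀ (online : List (List Bool)) (ec_parity : Int) (erasure_stripe_drives : Option Int), Dom_cluster_ec_status_from_online_matrix online ec_parity erasure_stripe_drives → Spec_cluster_ec_status_from_online_matrix online ec_parity erasure_stripe_drives (cluster_ec_status_from_online_matrix online ec_parity erasure_stripe_drives)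

-- ===== LEMMAS AND PROOFS =====

-- bridge: list sum over range = Finset sum
lemma sum_map_range_eq (m : Nat) (h : Nat → Nat) : ((List.range m).map h).sum = ∑ i ∈ Finset.range m, h i := by
  exact (Nat.add_zero ((List.map h (List.range m)).sum)).symm

-- countP over range as a 0/1 Finset sum
lemma countP_range_eq_sum (n : Nat) (p : Nat → Bool) :
    (List.range n).countP p = ∑ i ∈ Finset.range n, (if p i then 1 else 0) := by
  rw [← sum_map_range_eq]
  induction (List.range n) with
  | nil => simp
  | cons a t ih => by_cases h : p a <;> simp [ih, h] <;> omega

-- grouping a count over range (d*n) by quotient/remainder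
lemma countP_range_mul (n d : Nat) (hn : 0 < n) (f : Nat → Nat → Bool) :
    (List.range (d * n)).countP (fun k => f (k % n) (k / n)) =
      ((List.range d).map (fun q => (List.range n).countP (fun r => f r q))).sum := by
  induction d with
  | zero => simp
  | succ d ih =>
    have h1 : (d + 1) * n = d * n + n := by ring
    rw [h1, List.range_add, List.countP_append, ih, List.range_succ, List.map_append,
        List.sum_append]
    simp only [List.map_cons, List.map_nil, List.sum_cons, List.sum_nil, Nat.add_zero]
    congr 1
    rw [List.countP_map]
    refine List.countP_congr ?_
    intro r hr
    have hrn : r < n := List.mem_range.mp hr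
    have e1 : (d * n + r) % n = r := by
      rw [Nat.mul_comm d n, Nat.mul_add_mod]; exact Nat.mod_eq_of_lt hrn
    have e2 : (d * n + r) / n = d := by
      rw [Nat.mul_comm d n, Nat.mul_add_div hn, Nat.div_eq_of_lt hrn, Nat.add_zero]
    simp [Function.comp, e1, e2]

-- the inner 'counts[col // dpps] += 1' fold, pointwise
lemma foldl_modify_getElem? (d : Int) (l : List (Int × Bool)) (cs : List Int) (j : Nat) :
    ((l.foldl (fun cs2 p => if p.2 then cs2.modify (PySem.Int.floordiv p.1 d).toNat (· + 1) else cs2) cs))[j]? =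
      cs[j]?.map (· + (l.countP (fun p => p.2 && ((PySem.Int.floordiv p.1 d).toNat == j)) : Int)) := by
  induction l generalizing cs with
  | nil => cases h : cs[j]? <;> simp [h]
  | cons p t ih =>
    simp only [List.foldl_cons, List.countP_cons]
    by_cases hp : p.2
    · simp only [hp, if_true]
      rw [ih, List.getElem?_modify]
      by_cases hk : (PySem.Int.floordiv p.1 d).toNat = j
      · simp only [hk, if_true]
        cases h : cs[j]? <;> simp [h] <;> ring_nf
      · simp only [hk, if_false]
        cases h : cs[j]? <;> simp [h, hk]
    · simp only [Bool.not_eq_true] at hp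
      simp [hp, ih]



-- A's set loop with early return, characterised by two 'any' scans
lemma aSetLoop_eq (online : List (List Bool)) (n d S wq : Int) (l : List Int) (ov : String) :
    aSetLoop online n d S wq l ov =
      (if l.any (fun s => setCnt online n d S s < wq) then "quorum_lost"
       else if l.any (fun s => setCnt online n d S s < S) then "degraded" else ov) := by
  induction l generalizing ov with
  | nil => simp [aSetLoop]
  | cons s t ih =>
    simp only [aSetLoop, List.any_cons]
    by_cases h1 : setCnt online n d S s < wq
    · simp [h1]
    · by_cases h2 : setCnt online n d S s < S
      · simp only [h1, if_false, ih]
        by_cases h3 : t.any (fun s => setCnt online n d S s < wq) <;> simp [h2, h3]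
      · simp only [h1, if_false, ih]
        by_cases h3 : t.any (fun s => setCnt online n d S s < wq) <;> simp [h2, h3]

-- reading the literal stats dict back
lemma stats_get_set_size (n w p : Int) (e : Option Int) :
    ((compute_pool_erasure_stats n w p e).get? "set_size").getD 0 = effective_stripe_drives (n * w) e := by
  rfl
lemma stats_get_num_sets (n w p : Int) (e : Option Int) :
    ((compute_pool_erasure_stats n w p e).get? "num_sets").getD 0 =
      (if effective_stripe_drives (n * w) e != 0 then PySem.Int.floordiv (n * w) (effective_stripe_drives (n * w) e) else 0) := by
  rfl
lemma stats_get_write_quorum (n w p : Int) (e : Option Int) :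
    ((compute_pool_erasure_stats n w p e).get? "write_quorum").getD 0 =
      compute_write_quorum (effective_stripe_drives (n * w) e) p := by
  rfl

-- Nat version of the single-survivor sum
lemma sum_map_range_single_nat (M j : Nat) (h : Nat → Nat) (hj : j < M)
    (h0 : ∀ q, q < M → q ≠ j → h q = 0) : ((List.range M).map h).sum = h j := by
  induction M with
  | zero => omega
  | succ M ih =>
    rw [List.range_succ, List.map_append, List.sum_append]
    by_cases hjM : j = M
    · have hz : ((List.range M).map h).sum = 0 := by
        apply List.sum_eq_zero
        intro x hx
        obtain ⟨q, hq, rfl⟩ := List.mem_map.mp hx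
        exact h0 q (by have := List.mem_range.mp hq; omega) (by have := List.mem_range.mp hq; omega)
      simp [hz, hjM]
    · rw [ih (by omega) (fun q hq hne => h0 q (by omega) hne)]
      simp [h0 M (by omega) (fun e => hjM e.symm)]

-- restricting a counted range to the block of a single quotient
lemma block_count (dn Mn j : Nat) (hd : 0 < dn) (hj : j < Mn) (g : Nat → Bool) :
    (List.range (dn * Mn)).countP (fun k => g k && (k / dn == j)) =
      (List.range dn).countP (fun q => g (dn * j + q)) := by
  have h1 : (List.range (dn * Mn)).countP (fun k => g k && (k / dn == j)) =
      (List.range (Mn * dn)).countP (fun k => (fun r q => g (dn * q + r) && (q == j)) (k % dn) (k / dn)) := by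
    rw [Nat.mul_comm dn Mn]
    refine List.countP_congr ?_
    intro k _
    have : dn * (k / dn) + k % dn = k := Nat.div_add_mod k dn
    simp only [this]
  rw [h1, countP_range_mul dn Mn hd (fun r q => g (dn * q + r) && (q == j))]
  rw [sum_map_range_single_nat Mn j _ hj]
  · simp
  · intro q hq hne
    apply List.countP_eq_zero.mpr
    intro a _
    simp [hne]

-- a list map as a map over its index range
lemma map_eq_map_range {α β : Type} (dflt : α) (xs : List α) (F : α → β) :
    xs.map F = (List.range xs.length).map (fun i => F (xs.getD i dflt)) := by
  apply List.ext_getElem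
  · simp
  · intro i h1 h2
    have hi : i < xs.length := by simpa using h2
    simp only [List.getElem_map, List.getD_eq_getElem?_getD, List.getElem?_eq_getElem hi,
      List.getElem_range, Option.getD_some]

-- A's per-set count as a block double count
lemma setCnt_eq (online : List (List Bool)) (n dn j : Nat) (hn : 0 < n) (_honl : online.length = n) :
    setCnt online (n : Int) (dn : Int) ((n * dn : Nat) : Int) (j : Int) =
      (((List.range dn).map (fun q => (List.range n).countP
          (fun r => (online.getD r []).getD (dn * j + q) false))).sum : Int) := by
  simp only [setCnt]
  rw [PySem.List.foldl_if_add_one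
      (fun slot => PySem.List.pyGetD (PySem.List.pyGetD online (PySem.Int.mod slot n) [])
        (PySem.Int.floordiv slot n + (dn : Int) * (j : Int)) false)]
  rw [zero_add, PySem.List.pyRange_zero_nat, List.countP_map]
  have hcong : (List.range (n * dn)).countP
      ((fun slot => PySem.List.pyGetD (PySem.List.pyGetD online (PySem.Int.mod slot n) [])
        (PySem.Int.floordiv slot n + (dn : Int) * (j : Int)) false) ∘ (fun k : Nat => (k : Int))) =
      (List.range (dn * n)).countP (fun k => (fun r q => (online.getD r []).getD (dn * j + q) false) (k % n) (k / n)) := by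
    rw [Nat.mul_comm n dn]
    refine List.countP_congr ?_
    intro k _
    simp only [Function.comp, PySem.Int.mod_natCast, PySem.Int.floordiv_natCast,
      PySem.List.pyGetD_natCast]
    have : ((k / n : Nat) : Int) + (dn : Int) * (j : Int) = ((k / n + dn * j : Nat) : Int) := by push_cast; ring
    rw [this, PySem.List.pyGetD_natCast]
    have harg : k / n + dn * j = dn * j + k / n := by omega
    rw [harg]
  rw [hcong, countP_range_mul n dn hn (fun r q => (online.getD r []).getD (dn * j + q) false)]

-- the whole counting pass, pointwise
lemma bCountPass_getElem? (online : List (List Bool)) (d : Int) (cs : List Int) (j : Nat) :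
    (bCountPass online d cs)[j]? =
      cs[j]?.map (· + (online.map (fun row =>
        ((PySem.List.enumerate row).countP
          (fun p => p.2 && ((PySem.Int.floordiv p.1 d).toNat == j)) : Int))).sum) := by
  induction online generalizing cs with
  | nil => cases h : cs[j]? <;> simp [bCountPass, h]
  | cons row rest ih =>
    simp only [bCountPass, List.foldl_cons] at *
    rw [ih, foldl_modify_getElem? d (PySem.List.enumerate row) cs j]
    cases h : cs[j]? <;> simp [List.map_cons, List.sum_cons] <;> ring

-- per-row bucket count as an index-range count
lemma rowCnt_eq (row : List Bool) (dn j : Nat) :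
    (PySem.List.enumerate row).countP
        (fun p => p.2 && ((PySem.Int.floordiv p.1 (dn : Int)).toNat == j)) =
      (List.range row.length).countP (fun k => row.getD k false && (k / dn == j)) := by
  rw [PySem.List.enumerate_eq_map_pyRange row false, List.countP_map]
  have : PySem.List.pyRange 0 (PySem.List.len row) = List.map (fun k : Nat => (k : Int)) (List.range row.length) := by
    simp [PySem.List.len_eq, PySem.List.pyRange_zero_nat]
  rw [this, List.countP_map]
  refine List.countP_congr ?_
  intro k _
  simp only [Function.comp]
  rw [PySem.Int.floordiv_natCast k dn, Int.toNat_natCast]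
  simp

lemma sum_map_intCast (l : List (List Bool)) (f : List Bool → Nat) :
    (l.map (fun x => ((f x : Nat) : Int))).sum = ((l.map f).sum : Int) := by
  induction l with
  | nil => simp
  | cons a t ih => simp [ih]

-- exchanging the two finite counting orders
lemma sum_swap_count (a b : Nat) (f : Nat → Nat → Bool) :
    ((List.range a).map (fun q => (List.range b).countP (fun r => f r q))).sum =
      ((List.range b).map (fun r => (List.range a).countP (fun q => f r q))).sum := by
  rw [sum_map_range_eq, sum_map_range_eq]
  simp only [countP_range_eq_sum]
  exact Finset.sum_comm

-- the heart: A's per-set round-robin loop agrees with B's bucket pass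
lemma main_branch_eq (online : List (List Bool)) (w : Nat) (S M wq : Int)
    (hne : online ≠ []) (hw : 0 < w) (hrows : ∀ row ∈ online, row.length = w)
    (hM : 1 ≤ M) (hSM : S * M = (online.length : Int) * (w : Int))
    (hmod : PySem.Int.mod S (online.length : Int) = 0) :
    aSetLoop online (online.length : Int) (PySem.Int.floordiv S (online.length : Int)) S wq
        (PySem.List.pyRange 0 M) "healthy" =
      (let counts := bCountPass online (PySem.Int.floordiv S (online.length : Int))
          (List.replicate M.toNat 0)
       if counts.any (fun c => c < wq) then "quorum_lost"
       else if counts.any (fun c => c < S) then "degraded" else "healthy") := by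
  -- names and basic facts
  set n := online.length with hn
  have hn1 : 0 < n := List.length_pos_iff.mpr hne
  have hNpos : (0 : Int) < (n : Int) := by exact_mod_cast hn1
  have hWpos : (0 : Int) < (w : Int) := by exact_mod_cast hw
  have hSpos : (0 : Int) < S := by nlinarith
  set d := PySem.Int.floordiv S (n : Int) with hd
  have hdediv : d = S / (n : Int) := PySem.Int.floordiv_eq_ediv_of_pos hNpos
  have hdvd : (n : Int) ∣ S := by
    refine Int.dvd_of_emod_eq_zero ?_
    rw [← PySem.Int.mod_eq_emod_of_pos hNpos]
    exact hmod
  have hSnd : S = (n : Int) * d := by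
    rw [hdediv]; exact (Int.mul_ediv_cancel' hdvd).symm
  have hdpos : (0 : Int) < d := by nlinarith
  have hdM : d * M = (w : Int) := by
    have h : (n : Int) * (d * M) = (n : Int) * (w : Int) := by
      rw [← mul_assoc, ← hSnd]; exact hSM
    exact mul_left_cancel₀ (by omega) h
  set dn := d.toNat with hdn
  set Mn := M.toNat with hMn
  have hdcast : (dn : Int) = d := Int.toNat_of_nonneg (by omega)
  have hMcast : (Mn : Int) = M := Int.toNat_of_nonneg (by omega)
  have hdn1 : 0 < dn := by omega
  have hMn1 : 0 < Mn := by omega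
  have hwdM : w = dn * Mn := by
    have h : ((dn * Mn : Nat) : Int) = (w : Int) := by push_cast [hdcast, hMcast]; rw [hdM]
    exact_mod_cast h.symm
  have hScast : S = ((n * dn : Nat) : Int) := by push_cast [hdcast]; rw [hSnd]
  -- B's counts list, pointwise
  have hcounts : bCountPass online d (List.replicate Mn 0) =
      (List.range Mn).map (fun j =>
        (((online.map (fun row => (List.range dn).countP
            (fun q => row.getD (dn * j + q) false))).sum : Nat) : Int)) := by
    apply List.ext_getElem?
    intro i
    rw [bCountPass_getElem?]
    by_cases hi : i < Mn
    · rw [List.getElem?_replicate]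
      simp only [hi, if_pos]
      rw [List.getElem?_map, List.getElem?_range hi]
      simp only [Option.map_some]
      congr 1
      rw [zero_add]
      rw [← hdcast]
      have hrw : ∀ row ∈ online, (PySem.List.enumerate row).countP
            (fun p => p.2 && ((PySem.Int.floordiv p.1 (dn : Int)).toNat == i)) =
          (List.range dn).countP (fun q => row.getD (dn * i + q) false) := by
        intro row hrow
        rw [rowCnt_eq row dn i, hrows row hrow, hwdM, block_count dn Mn i hdn1 hi]
      calc (online.map (fun row => ((PySem.List.enumerate row).countP
              (fun p => p.2 && ((PySem.Int.floordiv p.1 (dn : Int)).toNat == i)) : Int))).sum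
          = (online.map (fun row => (((List.range dn).countP
              (fun q => row.getD (dn * i + q) false) : Nat) : Int))).sum := by
            apply congrArg
            apply List.map_congr_left
            intro row hrow
            exact congrArg (fun t : Nat => (t : Int)) (hrw row hrow)
        _ = _ := sum_map_intCast online _
    · rw [List.getElem?_replicate]
      simp [hi]
  -- pointwise equality of the two per-set counts
  have hpt : ∀ j, j ∈ List.range Mn → setCnt online (n : Int) d S (j : Int) =
      (((online.map (fun row => (List.range dn).countP
        (fun q => row.getD (dn * j + q) false))).sum : Nat) : Int) := by
    intro j _
    rw [← hdcast, hScast, setCnt_eq online n dn j hn1 rfl]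
    have hnat : ((List.range dn).map (fun q => (List.range n).countP
          (fun r => (online.getD r []).getD (dn * j + q) false))).sum
        = (online.map (fun row => (List.range dn).countP
          (fun q => row.getD (dn * j + q) false))).sum := by
      rw [sum_swap_count dn n (fun r q => (online.getD r []).getD (dn * j + q) false)]
      rw [map_eq_map_range ([] : List Bool) online (fun row => (List.range dn).countP
        (fun q => row.getD (dn * j + q) false))]
    exact congrArg (fun t : Nat => (t : Int)) hnat
  -- assemble
  rw [aSetLoop_eq, PySem.List.pyRange_zero, ← hMn, hcounts]
  simp only [List.any_map, Function.comp_def]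
  rw [PySem.List.any_congr_mem (fun j hj => by rw [hpt j hj] :
    ∀ j ∈ List.range Mn, (decide (setCnt online (n : Int) d S (j : Int) < wq)) =
      (decide ((((online.map (fun row => (List.range dn).countP
        (fun q => row.getD (dn * j + q) false))).sum : Nat) : Int) < wq)))]
  rw [PySem.List.any_congr_mem (fun j hj => by rw [hpt j hj] :
    ∀ j ∈ List.range Mn, (decide (setCnt online (n : Int) d S (j : Int) < S)) =
      (decide ((((online.map (fun row => (List.range dn).countP
        (fun q => row.getD (dn * j + q) false))).sum : Nat) : Int) < S)))]



-- ===== VERDICT (by name: the statement is the Claim_ definition above) =====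
theorem cluster_ec_status_from_online_matrix_spec : Claim_equal_cluster_ec_status_from_online_matrix := by
  intro online ec_parity erasure_stripe_drives _
  unfold Spec_cluster_ec_status_from_online_matrix
  cases online with
  | nil => rfl
  | cons row0 rest =>
    simp only [cluster_ec_status_from_online_matrix, cluster_ec_status_from_online_matrix_alt]
    by_cases hC1 : (((row0.length : Int) == 0) ||
        (row0 :: rest).any (fun row => (row.length : Int) != (row0.length : Int))) = true
    · rw [if_pos hC1, if_pos hC1]
    · rw [if_neg hC1, if_neg hC1]
      rw [stats_get_set_size, stats_get_num_sets, stats_get_write_quorum]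
      set N : Int := ((row0 :: rest).length : Int) with hN
      set W : Int := (row0.length : Int) with hW
      set S : Int := effective_stripe_drives (N * W) erasure_stripe_drives with hS
      set M : Int := (if S != 0 then PySem.Int.floordiv (N * W) S else 0) with hM
      set wq : Int := compute_write_quorum S ec_parity with hwq
      by_cases h1 : (decide (M < 1) || (S * M != N * W)) = true
      · rw [if_pos h1, if_pos (by rw [Bool.or_eq_true]; exact Or.inl h1)]
      · by_cases h2 : (PySem.Int.mod S N != 0) = true
        · rw [if_neg h1, if_pos h2, if_pos (by rw [Bool.or_eq_true]; exact Or.inr h2)]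
        · rw [if_neg h1, if_neg h2,
              if_neg (by rw [Bool.or_eq_true]; push_neg; exact ⟨h1, h2⟩ :
                ¬ (((decide (M < 1) || (S * M != N * W))) || (PySem.Int.mod S N != 0)) = true)]
          -- main branch: extract the arithmetic facts and use main_branch_eq
          simp only [Bool.or_eq_true, not_or, beq_iff_eq, List.any_eq_true, bne_iff_ne,
            decide_eq_true_eq] at hC1 h1 h2
          push_neg at hC1 h1 h2
          obtain ⟨hw0, hrows0⟩ := hC1
          rw [hW] at hw0 hrows0
          have hw : 0 < row0.length := by omega
          have hrows : ∀ row ∈ row0 :: rest, row.length = row0.length := by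
            intro row hrow
            exact_mod_cast hrows0 row hrow
          refine main_branch_eq (row0 :: rest) row0.length S M wq (by simp) hw hrows
            (by omega) ?_ ?_
          · rw [← hN, ← hW]; exact h1.2
          · rw [← hN]; exact h2
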